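-- pv_equiv track=rewrite | github.com/Ch-Hyuk/Algorithm-Study | 프로그래머스/이모티콘할인행사.py | solution
-- ===== SOURCE A (Python) =====
-- from itertools import product
--
-- def solution(users, emoticons):
--     result = [0,0]
--     percent = [10,20,30,40]
--     for cwr in product(percent, repeat=len(emoticons)):
--         emoticons_plus = 0
--         total_cost = 0
--
--         for user in users:
--             user_cost = 0
--             for i in range(len(emoticons)):
--                 if user[0] <= cwr[i]:
--                     user_cost += emoticons[i]*(100-cwr[i])//100
--
--             if user[1] <= user_cost:
--                 emoticons_plus += 1
--
--             else:
--                 total_cost += user_cost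
--
--         if result[0] < emoticons_plus:
--             result[0] = emoticons_plus
--             result[1] = total_cost
--
--         elif result[0] == emoticons_plus:
--             result[1] = max(result[1],total_cost)
--
--     return result
-- ===== SOURCE B (Python) =====
-- def solution(users, emoticons):
--     # DFS over emoticon indices, accumulating each user's running cost;
--     # the best (count, revenue) pair is the lexicographic maximum over all leaves.
--     best = (0, 0)
--
--     def score(costs):
--         cnt = 0
--         rev = 0
--         for u, c in zip(users, costs):
--             if u[1] <= c:
--                 cnt += 1
--             else:
--                 rev += c
--         return (cnt, rev)
--
--     def go(idx, costs):
--         nonlocal best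
--         if idx == len(emoticons):
--             best = max(best, score(costs))
--             return
--         e = emoticons[idx]
--         for r in (10, 20, 30, 40):
--             go(idx + 1,
--                [c + e * (100 - r) // 100 if u[0] <= r else c
--                 for u, c in zip(users, costs)])
--
--     go(0, [0] * len(users))
--     return list(best)
-- ===== Notes on version B (the rewrite author's own statement) =====
-- stated objective: alternative
-- what changed: Replaces the flat itertools.product loop (rebuilding each rate tuple and re-scanning emoticons per user) by a depth-first recursion over emoticon indices that threads per-user running costs and folds the best (count, revenue) as a lexicographic max.
-- outside the precondition, e.g. on solution([[30]], [1000]): A raises IndexError, B raises IndexError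
import Mathlib
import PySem

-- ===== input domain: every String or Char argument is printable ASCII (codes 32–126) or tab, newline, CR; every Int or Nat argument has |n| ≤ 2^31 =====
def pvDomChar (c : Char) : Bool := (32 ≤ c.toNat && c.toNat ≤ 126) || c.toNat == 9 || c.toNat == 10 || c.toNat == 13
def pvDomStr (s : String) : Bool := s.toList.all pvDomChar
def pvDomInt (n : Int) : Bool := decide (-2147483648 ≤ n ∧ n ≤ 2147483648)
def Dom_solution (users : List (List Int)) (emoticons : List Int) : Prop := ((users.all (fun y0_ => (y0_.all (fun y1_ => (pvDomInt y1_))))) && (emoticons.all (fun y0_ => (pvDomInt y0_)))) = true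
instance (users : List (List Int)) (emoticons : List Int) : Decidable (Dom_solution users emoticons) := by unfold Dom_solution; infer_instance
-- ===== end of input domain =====

-- B replaces A's flat itertools.product loop by a depth-first recursion over the
-- emoticons that threads per-user running costs, folding best = lexicographic max;
-- objective: alternative decomposition (same 4^m·n cost).

-- ===== PORT A =====
-- itertools.product([10,20,30,40], repeat=n), first coordinate varying slowest
def combosA : Nat → List (List Int)
  | 0 => [[]]
  | n + 1 => ([10, 20, 30, 40] : List Int).flatMap (fun r => (combosA n).map (fun t => r :: t))

def solution (users : List (List Int)) (emoticons : List Int) : List Int :=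
  let result :=
    (combosA emoticons.length).foldl (fun (result : Int × Int) cwr =>
      let score :=
        users.foldl (fun (s : Int × Int) user =>
          -- range(len(emoticons)): nonnegative indices, exact as List.range
          let user_cost :=
            (List.range emoticons.length).foldl (fun (c : Int) (i : Nat) =>
              if PySem.List.pyGetD user 0 0 ≤ PySem.List.pyGetD cwr (i : Int) 0 then
                c + PySem.Int.floordiv
                      (PySem.List.pyGetD emoticons (i : Int) 0 *
                        (100 - PySem.List.pyGetD cwr (i : Int) 0)) 100
              else c) 0
          if PySem.List.pyGetD user 1 0 ≤ user_cost then (s.1 + 1, s.2)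
          else (s.1, s.2 + user_cost)) ((0 : Int), (0 : Int))
      if result.1 < score.1 then (score.1, score.2)
      else if result.1 = score.1 then (result.1, max result.2 score.2)
      else result) ((0 : Int), (0 : Int))
  [result.1, result.2]

-- ===== PORT B =====
-- Python's max on two pairs: lexicographic, keeps the first argument on ties
def lexMaxB (b x : Int × Int) : Int × Int :=
  if b.1 < x.1 ∨ (b.1 = x.1 ∧ b.2 < x.2) then x else b

def scoreB (users : List (List Int)) (costs : List Int) : Int × Int :=
  (users.zip costs).foldl (fun (s : Int × Int) uc =>
    if PySem.List.pyGetD uc.1 1 0 ≤ uc.2 then (s.1 + 1, s.2) else (s.1, s.2 + uc.2))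
    ((0 : Int), (0 : Int))

-- go(idx, costs): recursion on the suffix of emoticons from idx
def goB (users : List (List Int)) : List Int → List Int → Int × Int → Int × Int
  | [], costs, best => lexMaxB best (scoreB users costs)
  | e :: rest, costs, best =>
      ([10, 20, 30, 40] : List Int).foldl (fun b r =>
        goB users rest
          ((users.zip costs).map (fun uc =>
            if PySem.List.pyGetD uc.1 0 0 ≤ r then
              uc.2 + PySem.Int.floordiv (e * (100 - r)) 100
            else uc.2)) b) best

def solution_alt (users : List (List Int)) (emoticons : List Int) : List Int :=
  let best := goB users emoticons (List.replicate users.length 0) ((0 : Int), (0 : Int))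
  [best.1, best.2]

-- ===== PRECONDITION & SPEC =====
-- Pre_ excludes users whose entry lists have fewer than two elements: Python A
-- raises IndexError on user[1] (or user[0]) there.
def Pre_solution (users : List (List Int)) (emoticons : List Int) : Prop :=
  ∀ u ∈ users, 2 ≤ u.length
instance (users : List (List Int)) (emoticons : List Int) : Decidable (Pre_solution users emoticons) := by unfold Pre_solution; infer_instance

def pvWitness_solution : List (List Int) × List Int := ([[30, 100], [40, 2]], [1000, 500])

def Spec_solution (users : List (List Int)) (emoticons : List Int) (out : List Int) : Prop := out = solution_alt users emoticons
instance (users : List (List Int)) (emoticons : List Int) (out : List Int) : Decidable (Spec_solution users emoticons out) := by unfold Spec_solution; infer_instance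

-- ===== CLAIM (what is proved, stated in full; the proofs are below) =====
def Claim_equal_solution : Prop := ∀ (users : List (List Int)) (emoticons : List Int), Dom_solution users emoticons → Pre_solution users emoticons → Spec_solution users emoticons (solution users emoticons)

-- ===== LEMMAS AND PROOFS =====

-- cost one user accumulates over a list of (price, discount-rate) pairs
def pstep (u : List Int) (c : Int) (er : Int × Int) : Int :=
  if PySem.List.pyGetD u 0 0 ≤ er.2 then
    c + PySem.Int.floordiv (er.1 * (100 - er.2)) 100
  else c

def perCost (u : List Int) (ps : List (Int × Int)) : Int := ps.foldl (pstep u) 0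

theorem foldl_ite_shift {β : Type} (P : β → Prop) [DecidablePred P] (g : β → Int) :
    ∀ (l : List β) (c : Int),
      l.foldl (fun c x => if P x then c + g x else c) c =
        c + l.foldl (fun c x => if P x then c + g x else c) 0 := by
  intro l
  induction l with
  | nil => intro c; simp
  | cons x xs ih =>
      intro c
      rw [List.foldl_cons, List.foldl_cons,
        ih (if P x then c + g x else c), ih (if P x then 0 + g x else 0)]
      split_ifs <;> ring

theorem perCost_shift (u : List Int) (ps : List (Int × Int)) (c : Int) :
    ps.foldl (pstep u) c = c + perCost u ps := by
  simp only [perCost]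
  exact foldl_ite_shift (fun er => PySem.List.pyGetD u 0 0 ≤ er.2)
    (fun er => PySem.Int.floordiv (er.1 * (100 - er.2)) 100) ps c

theorem perCost_cons (u : List Int) (p : Int × Int) (ps : List (Int × Int)) :
    perCost u (p :: ps) = pstep u 0 p + perCost u ps := by
  simp only [perCost, List.foldl_cons]
  exact perCost_shift u ps (pstep u 0 p)

-- the cost list B rebuilds at one emoticon, as a map over users
theorem stepCosts_eq (users : List (List Int)) (f : List Int → Int) (e r : Int) :
    (users.zip (users.map f)).map (fun uc =>
      if PySem.List.pyGetD uc.1 0 0 ≤ r then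
        uc.2 + PySem.Int.floordiv (e * (100 - r)) 100
      else uc.2) =
    users.map (fun u =>
      if PySem.List.pyGetD u 0 0 ≤ r then
        f u + PySem.Int.floordiv (e * (100 - r)) 100
      else f u) := by
  induction users with
  | nil => rfl
  | cons u us ih => simp only [List.map_cons, List.zip_cons_cons, ih]

-- B's leaf scoring over (users.zip (users.map f)) is a fold over users
theorem scoreB_map (users : List (List Int)) (f : List Int → Int) :
    scoreB users (users.map f) =
      users.foldl (fun (s : Int × Int) u =>
        if PySem.List.pyGetD u 1 0 ≤ f u then (s.1 + 1, s.2) else (s.1, s.2 + f u))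
        ((0 : Int), (0 : Int)) := by
  unfold scoreB
  generalize ((0 : Int), (0 : Int)) = init
  induction users generalizing init with
  | nil => rfl
  | cons u us ih => simp only [List.map_cons, List.zip_cons_cons, List.foldl_cons, ih]

-- foldl over flatMap
theorem foldl_flatMap' {α β γ : Type} (l : List α) (g : α → List β)
    (h : γ → β → γ) (b : γ) :
    (l.flatMap g).foldl h b = l.foldl (fun b x => (g x).foldl h b) b := by
  induction l generalizing b with
  | nil => rfl
  | cons x xs ih => simp [List.foldl_append, ih]

-- characterisation of B's recursion
theorem goB_spec (users : List (List Int)) (em : List Int)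
    (f : List Int → Int) (best : Int × Int) :
    goB users em (users.map f) best =
      (combosA em.length).foldl (fun b cwr =>
        lexMaxB b (scoreB users (users.map (fun u => f u + perCost u (em.zip cwr))))) best := by
  induction em generalizing f best with
  | nil =>
      simp only [goB, List.length_nil, combosA, List.foldl_cons, List.foldl_nil,
        List.zip_nil_right]
      have : (fun u => f u + perCost u ([] : List (Int × Int))) = f := by
        funext u; simp [perCost]
      rw [this]
  | cons e rest ih =>
      simp only [goB, List.length_cons, combosA, foldl_flatMap', List.foldl_map]
      have hF : (fun (b : Int × Int) (r : Int) =>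
          goB users rest
            ((users.zip (users.map f)).map (fun uc =>
              if PySem.List.pyGetD uc.1 0 0 ≤ r then
                uc.2 + PySem.Int.floordiv (e * (100 - r)) 100
              else uc.2)) b) =
          (fun (b : Int × Int) (r : Int) =>
            (combosA rest.length).foldl (fun b cwr =>
              lexMaxB b (scoreB users (users.map (fun u =>
                f u + perCost u ((e :: rest).zip (r :: cwr)))))) b) := by
        funext b r
        rw [stepCosts_eq, ih]
        congr 1
        funext b' cwr
        have hmap : users.map (fun u =>
            (if PySem.List.pyGetD u 0 0 ≤ r then
              f u + PySem.Int.floordiv (e * (100 - r)) 100 else f u) +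
              perCost u (rest.zip cwr)) =
            users.map (fun u => f u + perCost u ((e :: rest).zip (r :: cwr))) := by
          apply List.map_congr_left
          intro u _
          rw [List.zip_cons_cons, perCost_cons]
          simp only [pstep]
          split_ifs <;> ring
        rw [hmap]
      rw [hF]

-- A's inner index loop computes perCost over the zip
theorem range_fold_perCost (u : List Int) :
    ∀ (em cwr : List Int), cwr.length = em.length →
    (List.range em.length).foldl (fun (c : Int) (i : Nat) =>
        if PySem.List.pyGetD u 0 0 ≤ PySem.List.pyGetD cwr (i : Int) 0 then
          c + PySem.Int.floordiv
                (PySem.List.pyGetD em (i : Int) 0 *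
                  (100 - PySem.List.pyGetD cwr (i : Int) 0)) 100
        else c) 0 = perCost u (em.zip cwr) := by
  intro em
  induction em with
  | nil => intro cwr h; simp [perCost]
  | cons e rest ih =>
      intro cwr h
      cases cwr with
      | nil => simp at h
      | cons r crest =>
          simp only [List.length_cons] at h
          rw [List.zip_cons_cons, perCost_cons]
          rw [List.length_cons, List.range_succ_eq_map, List.foldl_cons, List.foldl_map]
          have h0 : ∀ (xs : List Int) (x : Int) (i : Nat),
              PySem.List.pyGetD (x :: xs) ((i.succ : Nat) : Int) 0 =
                PySem.List.pyGetD xs (i : Int) 0 := by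
            intro xs x i
            rw [PySem.List.pyGetD_natCast, PySem.List.pyGetD_natCast]
            rfl
          have hg0 : PySem.List.pyGetD (r :: crest) (((0 : Nat) : Int)) 0 = r := by
            rw [PySem.List.pyGetD_natCast]; rfl
          have hg0' : PySem.List.pyGetD (e :: rest) (((0 : Nat) : Int)) 0 = e := by
            rw [PySem.List.pyGetD_natCast]; rfl
          have hstep : (fun (c : Int) (i : Nat) =>
              if PySem.List.pyGetD u 0 0 ≤ PySem.List.pyGetD (r :: crest) ((i.succ : Nat) : Int) 0 then
                c + PySem.Int.floordiv
                      (PySem.List.pyGetD (e :: rest) ((i.succ : Nat) : Int) 0 *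
                        (100 - PySem.List.pyGetD (r :: crest) ((i.succ : Nat) : Int) 0)) 100
              else c) =
              (fun (c : Int) (i : Nat) =>
              if PySem.List.pyGetD u 0 0 ≤ PySem.List.pyGetD crest (i : Int) 0 then
                c + PySem.Int.floordiv
                      (PySem.List.pyGetD rest (i : Int) 0 *
                        (100 - PySem.List.pyGetD crest (i : Int) 0)) 100
              else c) := by
            funext c i
            rw [h0, h0]
          rw [hg0, hg0', hstep,
            foldl_ite_shift
              (fun i : Nat => PySem.List.pyGetD u 0 0 ≤ PySem.List.pyGetD crest (i : Int) 0)
              (fun i : Nat => PySem.Int.floordiv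
                (PySem.List.pyGetD rest (i : Int) 0 *
                  (100 - PySem.List.pyGetD crest (i : Int) 0)) 100),
            ih crest (by omega)]
          simp only [pstep]

-- A's branch chain is the lexicographic max
theorem update_eq_lexMax (res sc : Int × Int) :
    (if res.1 < sc.1 then (sc.1, sc.2)
     else if res.1 = sc.1 then (res.1, max res.2 sc.2)
     else res) = lexMaxB res sc := by
  rcases res with ⟨a, b⟩
  rcases sc with ⟨c, d⟩
  simp only [lexMaxB]
  split_ifs <;> simp_all <;> omega

-- every combo has the expected length
theorem combosA_length (n : Nat) : ∀ cwr ∈ combosA n, cwr.length = n := by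
  induction n with
  | zero => intro cwr h; simp [combosA] at h; simp [h]
  | succ n ih =>
      intro cwr h
      simp only [combosA, List.mem_flatMap, List.mem_map] at h
      obtain ⟨r, _, t, ht, rfl⟩ := h
      simp [ih t ht]

theorem solution_eq (users : List (List Int)) (emoticons : List Int) :
    solution users emoticons = solution_alt users emoticons := by
  unfold solution solution_alt
  have hrepl : List.replicate users.length (0 : Int) =
      users.map (fun _ => (0 : Int)) := by
    simp [List.map_const']
  rw [hrepl, goB_spec]
  have hfold :
      (combosA emoticons.length).foldl (fun (result : Int × Int) cwr =>
        let score :=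
          users.foldl (fun (s : Int × Int) user =>
            let user_cost :=
              (List.range emoticons.length).foldl (fun (c : Int) (i : Nat) =>
                if PySem.List.pyGetD user 0 0 ≤ PySem.List.pyGetD cwr (i : Int) 0 then
                  c + PySem.Int.floordiv
                        (PySem.List.pyGetD emoticons (i : Int) 0 *
                          (100 - PySem.List.pyGetD cwr (i : Int) 0)) 100
                else c) 0
            if PySem.List.pyGetD user 1 0 ≤ user_cost then (s.1 + 1, s.2)
            else (s.1, s.2 + user_cost)) ((0 : Int), (0 : Int))
        if result.1 < score.1 then (score.1, score.2)
        else if result.1 = score.1 then (result.1, max result.2 score.2)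
        else result) ((0 : Int), (0 : Int)) =
      (combosA emoticons.length).foldl (fun b cwr =>
        lexMaxB b (scoreB users (users.map (fun u =>
          (fun _ => (0 : Int)) u + perCost u (emoticons.zip cwr))))) ((0 : Int), (0 : Int)) := by
    refine PySem.List.foldl_congr_mem _ _ _ _ ?_
    intro res cwr hmem
    have hlen : cwr.length = emoticons.length := combosA_length _ cwr hmem
    have hscore :
        users.foldl (fun (s : Int × Int) user =>
          let user_cost :=
            (List.range emoticons.length).foldl (fun (c : Int) (i : Nat) =>
              if PySem.List.pyGetD user 0 0 ≤ PySem.List.pyGetD cwr (i : Int) 0 then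
                c + PySem.Int.floordiv
                      (PySem.List.pyGetD emoticons (i : Int) 0 *
                        (100 - PySem.List.pyGetD cwr (i : Int) 0)) 100
              else c) 0
          if PySem.List.pyGetD user 1 0 ≤ user_cost then (s.1 + 1, s.2)
          else (s.1, s.2 + user_cost)) ((0 : Int), (0 : Int)) =
        scoreB users (users.map (fun u =>
          (fun _ => (0 : Int)) u + perCost u (emoticons.zip cwr))) := by
      have hzero : (fun u => (fun _ => (0 : Int)) u + perCost u (emoticons.zip cwr)) =
          (fun u => perCost u (emoticons.zip cwr)) := by
        funext u; simp
      rw [hzero, scoreB_map]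
      apply PySem.List.foldl_congr_mem
      intro s user _
      simp only
      rw [range_fold_perCost user emoticons cwr hlen]
    simp only at hscore ⊢
    rw [hscore, update_eq_lexMax]
  simp only at hfold ⊢
  rw [hfold]

-- ===== VERDICT (by name: the statement is the Claim_ definition above) =====
theorem solution_spec : Claim_equal_solution := by
  intro users emoticons _ _
  unfold Spec_solution
  exact solution_eq users emoticons
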